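-- pv_equiv track=rewrite | github.com/soyukke/lean-unsolved | scripts/both_survive_v4_reinterpret.py | non_excluded_precise
-- ===== SOURCE A (Python) =====
-- def non_excluded_precise(r, k):
--     """rがmod 2^kで非排除かどうか"""
--     mod = 2**k
--     # rから始めてSyracuse反復を追跡
--     # mod 2^k の情報で「下降ステップ」が確定するかどうか
--     cur = r % mod
--     for step in range(k):
--         if cur % 2 == 0:
--             return False  # 偶数は即下降
--         if cur % 4 == 1:
--             return False  # mod 4 ≡ 1 → v2 >= 2 → 下降確定
--         # cur % 4 == 3: 上昇ステップ T(cur) = (3*cur+1)/2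
--         cur = ((3 * cur + 1) // 2) % mod
--     return True  # k ステップ経っても下降確定しない
-- ===== SOURCE B (Python) =====
-- def non_excluded_precise(r, k):
--     """rがmod 2^kで非排除かどうか"""
--     # Survival of the Syracuse check loop is impossible for k >= 1: each
--     # ascending step strictly lowers the 2-adic valuation of cur+1, which
--     # starts at most k, so within k steps one of the checks fires.  Hence
--     # the answer is simply whether the loop body never runs.
--     return k <= 0
-- ===== Notes on version B (the rewrite author's own statement) =====
-- stated objective: faster
-- what changed: B replaces the O(k) Syracuse simulation with the closed form k <= 0, justified by the fact that each ascending step strictly decreases the 2-adic valuation of cur+1 (which starts at most k), so the loop can never run to completion for k >= 1.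
import Mathlib
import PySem

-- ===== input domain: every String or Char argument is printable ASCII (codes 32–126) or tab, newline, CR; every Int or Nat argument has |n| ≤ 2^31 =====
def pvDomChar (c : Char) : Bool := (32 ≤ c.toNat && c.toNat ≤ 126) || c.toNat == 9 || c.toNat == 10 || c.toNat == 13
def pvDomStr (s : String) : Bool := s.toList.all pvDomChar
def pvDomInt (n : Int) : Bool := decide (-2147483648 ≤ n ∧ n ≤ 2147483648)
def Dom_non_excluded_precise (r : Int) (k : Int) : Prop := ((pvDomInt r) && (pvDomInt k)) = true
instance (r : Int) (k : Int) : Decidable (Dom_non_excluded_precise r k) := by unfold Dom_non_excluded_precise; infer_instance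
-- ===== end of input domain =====

-- B replaces A's O(k) Syracuse simulation by the closed form 'k ≤ 0' (the loop can
-- never survive k ≥ 1 steps); return-value equivalence is proved on Pre_ below.

-- ===== PORT A =====
-- the 'for step in range(k): …return False…' loop of A, run on cur for n iterations
def pvLoopA (modv : Int) : Nat → Int → Bool
  | 0, _ => true
  | n + 1, cur =>
    if PySem.Int.mod cur 2 == 0 then false
    else if PySem.Int.mod cur 4 == 1 then false
    else pvLoopA modv n (PySem.Int.mod (PySem.Int.floordiv (3 * cur + 1) 2) modv)

-- for k < 0 Python computes mod/cur as floats, but range(k) is empty and both are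
-- otherwise unused, so the port is exact on Pre_ (where Python returns at all)
def non_excluded_precise (r : Int) (k : Int) : Bool :=
  let modv : Int := 2 ^ k.toNat
  let cur := PySem.Int.mod r modv
  pvLoopA modv k.toNat cur

-- ===== PORT B =====
def non_excluded_precise_alt (r : Int) (k : Int) : Bool := decide (k ≤ 0)

-- ===== PRECONDITION & SPEC =====
-- Pre_ excludes only inputs where A raises: for k ≤ -1075 the float 2.0**k
-- underflows to 0.0 and 'r % mod' raises ZeroDivisionError.
def Pre_non_excluded_precise (r : Int) (k : Int) : Prop := -1074 ≤ k
instance (r : Int) (k : Int) : Decidable (Pre_non_excluded_precise r k) := by unfold Pre_non_excluded_precise; infer_instance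
def pvWitness_non_excluded_precise : Int × Int := (3, 2)

def Spec_non_excluded_precise (r : Int) (k : Int) (out : Bool) : Prop := out = non_excluded_precise_alt r k
instance (r : Int) (k : Int) (out : Bool) : Decidable (Spec_non_excluded_precise r k out) := by unfold Spec_non_excluded_precise; infer_instance

-- ===== CLAIM (what is proved, stated in full; the proofs are below) =====
def Claim_equal_non_excluded_precise : Prop := ∀ (r : Int) (k : Int), Dom_non_excluded_precise r k → Pre_non_excluded_precise r k → Spec_non_excluded_precise r k (non_excluded_precise r k)

-- ===== LEMMAS AND PROOFS =====

-- surviving n+1 iterations forces 2^(n+2) ∣ cur+1 (the valuation argument)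
theorem pvLoopA_surv (kt : Nat) : ∀ (n : Nat) (cur : Int), 0 ≤ cur → n + 1 ≤ kt →
    pvLoopA (2 ^ kt) (n + 1) cur = true → (2 : Int) ^ (n + 2) ∣ cur + 1 := by
  intro n
  induction n with
  | zero =>
    intro cur hc _ h
    simp only [pvLoopA, PySem.Int.mod_eq_emod_of_pos (a := cur) (by norm_num : (0:Int) < 2),
      PySem.Int.mod_eq_emod_of_pos (a := cur) (by norm_num : (0:Int) < 4)] at h
    split_ifs at h with h2 h4
    simp only [beq_iff_eq] at h2 h4
    omega
  | succ n ih =>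
    intro cur hc hle h
    rw [pvLoopA] at h
    rw [PySem.Int.mod_eq_emod_of_pos (a := cur) (by norm_num : (0:Int) < 2),
      PySem.Int.mod_eq_emod_of_pos (a := cur) (by norm_num : (0:Int) < 4)] at h
    split_ifs at h with h2 h4
    simp only [beq_iff_eq] at h2 h4
    -- cur ≡ 3 (mod 4): write cur + 1 = 4*t
    obtain ⟨t, ht⟩ : (4:Int) ∣ cur + 1 := by omega
    have hpow : (0:Int) < 2 ^ kt := by positivity
    have hfd : PySem.Int.floordiv (3 * cur + 1) 2 = (3 * cur + 1) / 2 :=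
      PySem.Int.floordiv_eq_ediv_of_pos (by norm_num)
    have hmd : PySem.Int.mod ((3 * cur + 1) / 2) (2 ^ kt) = ((3 * cur + 1) / 2) % (2 ^ kt) :=
      PySem.Int.mod_eq_emod_of_pos hpow
    rw [hfd, hmd] at h
    set q : Int := (3 * cur + 1) / 2 with hq
    have hqval : q = 6 * t - 1 := by omega
    set cur' : Int := q % 2 ^ kt with hcur'
    have hc' : 0 ≤ cur' := Int.emod_nonneg q (by positivity)
    have ihd : (2 : Int) ^ (n + 2) ∣ cur' + 1 := ih cur' hc' (by omega) h
    -- pull the divisibility back through the mod-2^kt reduction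
    have hdvdpow : (2 : Int) ^ (n + 2) ∣ 2 ^ kt := pow_dvd_pow 2 (by omega)
    have hqdecomp : q + 1 = (cur' + 1) + 2 ^ kt * (q / 2 ^ kt) := by
      have := Int.emod_def q (2 ^ kt)
      omega
    have hdq : (2 : Int) ^ (n + 2) ∣ q + 1 := by
      rw [hqdecomp]
      exact dvd_add ihd (Dvd.dvd.mul_right hdvdpow _)
    -- q + 1 = 3 * (2t); 2^(n+2) coprime to 3 ⇒ 2^(n+2) ∣ 2t
    have hcop : IsCoprime ((2 : Int) ^ (n + 2)) 3 :=
      IsCoprime.pow_left ⟨-1, 1, by ring⟩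
    have hdt : (2 : Int) ^ (n + 2) ∣ 2 * t := by
      have h3 : (2 : Int) ^ (n + 2) ∣ (2 * t) * 3 := by
        have : q + 1 = (2 * t) * 3 := by omega
        rwa [this] at hdq
      exact hcop.dvd_of_dvd_mul_right h3
    obtain ⟨c, hcq⟩ := hdt
    exact ⟨c, by rw [ht]; rw [pow_succ]; linarith [hcq]⟩

theorem pvLoopA_false (kt : Nat) (hkt : 1 ≤ kt) (cur : Int)
    (h0 : 0 ≤ cur) (hlt : cur < 2 ^ kt) : pvLoopA (2 ^ kt) kt cur = false := by
  cases hres : pvLoopA (2 ^ kt) kt cur with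
  | false => rfl
  | true =>
    exfalso
    obtain ⟨n, rfl⟩ : ∃ n, kt = n + 1 := ⟨kt - 1, by omega⟩
    have hd := pvLoopA_surv (n + 1) n cur h0 (le_refl _) hres
    have hle := Int.le_of_dvd (by omega) hd
    have : (2 : Int) ^ (n + 2) = 2 ^ (n + 1) * 2 := pow_succ 2 (n + 1)
    have hp : (0:Int) < 2 ^ (n + 1) := by positivity
    omega

-- ===== VERDICT (by name: the statement is the Claim_ definition above) =====
theorem non_excluded_precise_spec : Claim_equal_non_excluded_precise := by
  intro r k _ _
  unfold Spec_non_excluded_precise non_excluded_precise non_excluded_precise_alt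
  by_cases hk : k ≤ 0
  · have : k.toNat = 0 := Int.toNat_of_nonpos hk
    simp [this, pvLoopA, hk]
  · have hkt : 1 ≤ k.toNat := by omega
    have hpow : (0:Int) < 2 ^ k.toNat := by positivity
    have hm : PySem.Int.mod r (2 ^ k.toNat) = r % 2 ^ k.toNat :=
      PySem.Int.mod_eq_emod_of_pos hpow
    simp only [hm]
    rw [pvLoopA_false k.toNat hkt _ (Int.emod_nonneg r (by positivity))
      (Int.emod_lt_of_pos r hpow)]
    simp [hk]
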